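-- pv_equiv track=rewrite | github.com/katieT92/Karatsuba | main.py | appendZeros
-- ===== SOURCE A (Python) =====
-- def appendZeros(list):
--   for i in range(len(list)):
--     calculation = [digit for digit in str(list[i])]
--     if listNumRepresentationIsNegative(calculation):
--       calculation = joinIdx1and2(calculation)
--     for e in range(len(list) - 1 - i):
--       calculation.append('0')
--     list[i] = convertListToInt(calculation)
--   return list
--
-- def listNumRepresentationIsNegative(list):
--   return list[0] == '-'
--
-- def joinIdx1and2(list):
--   list[0] += list[1]
--   list.pop(1)
--   return list
--
-- def convertListToInt(list):
--   list_string = "".join(list)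
--   return int(list_string)
-- ===== SOURCE B (Python) =====
-- def appendZeros(list):
--     # Builds a NEW list back-to-front: walk the input reversed, keeping an
--     # accumulated zero-suffix that grows by one '0' per step, and convert
--     # str(x) + suffix directly; no char-list pipeline, no helpers.
--     out = []
--     zeros = ""
--     for x in reversed(list):
--         out.append(int(str(x) + zeros))
--         zeros += "0"
--     out.reverse()
--     return out
-- ===== Notes on version B (the rewrite author's own statement) =====
-- stated objective: alternative
-- what changed: Replaces the per-element char-list pipeline (split str(x) into a char list, merge the '-' cell, append '0' cells in an inner loop, join, int) and the in-place index loop by a single reversed back-to-front pass that keeps one accumulated zero-suffix string and directly computes int(str(x) + suffix), returning a new list.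
import Mathlib
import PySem

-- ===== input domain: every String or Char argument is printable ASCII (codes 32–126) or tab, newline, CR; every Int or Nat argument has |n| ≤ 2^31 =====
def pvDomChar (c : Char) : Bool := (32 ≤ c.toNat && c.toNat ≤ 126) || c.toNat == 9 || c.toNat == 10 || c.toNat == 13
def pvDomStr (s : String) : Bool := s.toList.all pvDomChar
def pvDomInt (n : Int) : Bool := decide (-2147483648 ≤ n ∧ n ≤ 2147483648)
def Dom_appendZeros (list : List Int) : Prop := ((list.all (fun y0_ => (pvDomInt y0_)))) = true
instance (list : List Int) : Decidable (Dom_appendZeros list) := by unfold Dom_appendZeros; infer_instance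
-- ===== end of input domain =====

-- B replaces A's char-list pipeline and in-place index loop by a reversed back-to-front
-- pass with an accumulated zero-suffix string ("alternative"); equivalence is about the
-- RETURN value only (Python A mutates its argument in place, B builds a new list).


-- ===== PORT A =====
-- list[0] == '-'; the IndexError on [] is unreachable here (str of an int is nonempty)
def listNumRepresentationIsNegative (l : List String) : Bool :=
  PySem.List.pyGet? l 0 == some "-"

-- list[0] += list[1]; list.pop(1)  (the IndexErrors are unreachable: called only on
-- '-'-headed char lists, which have length ≥ 2)
def joinIdx1and2 (l : List String) : List String :=
  let l := PySem.List.pySetD l 0 ((PySem.List.pyGet? l 0).getD "" ++ (PySem.List.pyGet? l 1).getD "")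
  match PySem.List.pop? l 1 with
  | some r => r.2
  | none => l

-- int("".join(list)); the ValueError is unreachable here (the joined text is str(int) plus '0's)
def convertListToInt (l : List String) : Int :=
  (PySem.Int.ofStr? (PySem.Str.join "" l)).getD 0

def appendZeros (list : List Int) : List Int :=
  (PySem.List.enumerate list).map (fun p =>
    let calculation := (PySem.Int.toStr p.2).toList.map (fun c => String.ofList [c])
    let calculation := if listNumRepresentationIsNegative calculation then joinIdx1and2 calculation else calculation
    let calculation := (PySem.List.pyRange 0 (PySem.List.len list - 1 - p.1) 1).foldl (fun c _ => c ++ ["0"]) calculation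
    convertListToInt calculation)

-- ===== PORT B =====
def appendZeros_alt (list : List Int) : List Int :=
  let step := fun (st : List Int × String) (x : Int) =>
    (st.1 ++ [(PySem.Int.ofStr? (PySem.Int.toStr x ++ st.2)).getD 0], st.2 ++ "0")
  ((list.reverse.foldl step ([], "")).1).reverse

-- ===== PRECONDITION & SPEC =====
def Spec_appendZeros (list : List Int) (out : List Int) : Prop := out = appendZeros_alt list
instance (list : List Int) (out : List Int) : Decidable (Spec_appendZeros list out) := by unfold Spec_appendZeros; infer_instance

-- ===== CLAIM (what is proved, stated in full; the proofs are below) =====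
def Claim_equal_appendZeros : Prop := ∀ (list : List Int), Dom_appendZeros list → Spec_appendZeros list (appendZeros list)

-- ===== LEMMAS AND PROOFS =====

-- "parse str(x) followed by zs" — the per-element value both ports compute
def pvP (x : Int) (zs : List Char) : Int :=
  (PySem.Int.ofChars? (PySem.Int.toChars x ++ zs)).getD 0

-- B's reversed loop, extracted as structural recursion on the remaining elements
def pvF (ys : List Int) (z : List Char) : List Int :=
  match ys with
  | [] => []
  | y :: ys => pvP y z :: pvF ys (z ++ ['0'])

theorem pv_toDigitsCore_digits : ∀ (f n : Nat) (acc : List Char),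
    (∀ c ∈ acc, c.isDigit = true) → ∀ c ∈ Nat.toDigitsCore 10 f n acc, c.isDigit = true := by
  intro f
  induction f with
  | zero => intro n acc hacc; simpa [Nat.toDigitsCore] using hacc
  | succ f ih =>
    intro n acc hacc c hc
    have hd : (Nat.digitChar (n % 10)).isDigit = true := by
      have h10 : n % 10 < 10 := Nat.mod_lt _ (by norm_num)
      set m := n % 10 with hm
      interval_cases m <;> decide
    simp only [Nat.toDigitsCore] at hc
    split at hc
    · rcases List.mem_cons.mp hc with rfl | hc
      · exact hd
      · exact hacc _ hc
    · refine ih _ _ ?_ c hc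
      intro d hd'
      rcases List.mem_cons.mp hd' with rfl | h
      · exact hd
      · exact hacc _ h
theorem pv_toDigitsCore_ne_nil : ∀ (f n : Nat) (acc : List Char), acc ≠ [] →
    Nat.toDigitsCore 10 f n acc ≠ [] := by
  intro f
  induction f with
  | zero => intro n acc h; simpa [Nat.toDigitsCore] using h
  | succ f ih =>
    intro n acc h
    simp only [Nat.toDigitsCore]
    split
    · simp
    · exact ih _ _ (by simp)
theorem pv_toDigits_digits (n : Nat) : ∀ c ∈ Nat.toDigits 10 n, c.isDigit = true :=
  pv_toDigitsCore_digits _ _ _ (by simp)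
theorem pv_toDigits_ne_nil (n : Nat) : Nat.toDigits 10 n ≠ [] := by
  unfold Nat.toDigits
  simp only [Nat.toDigitsCore]
  split
  · simp
  · exact pv_toDigitsCore_ne_nil _ _ _ (by simp)
theorem pv_join_nil_flatten : ∀ (L : List (List Char)), PySem.Chars.join [] L = L.flatten := by
  intro L
  induction L with
  | nil => simp [PySem.Chars.join_nil]
  | cons p rest ih =>
    cases rest with
    | nil => simp [PySem.Chars.join_singleton]
    | cons q r => rw [PySem.Chars.join_cons_cons]; simp at ih ⊢; simp [ih]

theorem pv_length_pvF (ys : List Int) : ∀ (z : List Char), (pvF ys z).length = ys.length := by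
  induction ys with
  | nil => intro z; simp [pvF]
  | cons y ys ih => intro z; simp [pvF, ih]
theorem pv_getElem?_pvF (ys : List Int) : ∀ (z : List Char) (i : Nat),
    (pvF ys z)[i]? = ys[i]?.map (fun y => pvP y (z ++ List.replicate i '0')) := by
  induction ys with
  | nil => intro z i; simp [pvF]
  | cons y ys ih =>
    intro z i
    cases i with
    | zero => simp [pvF]
    | succ i =>
      simp only [pvF, List.getElem?_cons_succ]
      rw [ih]
      simp [List.replicate_succ, List.append_assoc]

theorem pv_foldB (ys : List Int) : ∀ (acc : List Int) (z : String),
    ((ys.foldl (fun (st : List Int × String) (x : Int) =>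
      (st.1 ++ [(PySem.Int.ofStr? (PySem.Int.toStr x ++ st.2)).getD 0], st.2 ++ "0")) (acc, z)).1)
    = acc ++ pvF ys z.toList := by
  induction ys with
  | nil => intro acc z; simp [pvF]
  | cons y ys ih =>
    intro acc z
    rw [List.foldl_cons]
    rw [ih]
    have hz : (z ++ "0").toList = z.toList ++ ['0'] := by simp [String.toList_append]
    have hy : (PySem.Int.ofStr? (PySem.Int.toStr y ++ z)).getD 0 = pvP y z.toList := by
      rw [PySem.Int.ofStr?.eq_1, String.toList_append, PySem.Int.toList_toStr]; rfl
    simp [pvF, hz, hy]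

theorem pv_flatten_rep (k : Nat) : (List.replicate k ['0']).flatten = List.replicate k '0' := by
  induction k with
  | zero => simp
  | succ k ih => simp [List.replicate_succ, ih]

-- the joined text of A's char list is str(x)'s chars
theorem pv_cl_toChars (x : Int) :
    (List.map String.toList
      (let c0 := (PySem.Int.toStr x).toList.map (fun c => String.ofList [c])
       if listNumRepresentationIsNegative c0 then joinIdx1and2 c0 else c0)).flatten
    = PySem.Int.toChars x := by
  rw [PySem.Int.toList_toStr]
  by_cases hx : x < 0
  · have htc : PySem.Int.toChars x = '-' :: Nat.toDigits 10 x.natAbs := by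
      simp [PySem.Int.toChars, hx]
    obtain ⟨d, ds, hds⟩ : ∃ d ds, Nat.toDigits 10 x.natAbs = d :: ds := by
      rcases h : Nat.toDigits 10 x.natAbs with _ | ⟨d, ds⟩
      · exact absurd h (pv_toDigits_ne_nil _)
      · exact ⟨d, ds, rfl⟩
    rw [htc, hds]
    have hneg : listNumRepresentationIsNegative
        (('-' :: d :: ds).map (fun c => String.ofList [c])) = true := by
      simp [listNumRepresentationIsNegative, PySem.List.pyGet?_zero_cons]
    rw [if_pos hneg]
    simp only [List.map_cons]
    have h0 : (0:Int) ≤ (ds.length:Int) + 1 := by omega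
    simp [joinIdx1and2, PySem.List.pySetD, PySem.List.pySet?, PySem.List.pyGet?, PySem.List.pyIdx?, PySem.List.pop?, h0]
    simp only [Function.comp_def, String.toList_ofList]
    rw [← pv_join_nil_flatten, PySem.Chars.join_nil_singletons]
  · have htc : PySem.Int.toChars x = Nat.toDigits 10 x.toNat := by
      simp [PySem.Int.toChars, hx]
    obtain ⟨d, ds, hds⟩ : ∃ d ds, Nat.toDigits 10 x.toNat = d :: ds := by
      rcases h : Nat.toDigits 10 x.toNat with _ | ⟨d, ds⟩
      · exact absurd h (pv_toDigits_ne_nil _)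
      · exact ⟨d, ds, rfl⟩
    have hd : d ≠ '-' := by
      have := pv_toDigits_digits x.toNat d (by rw [hds]; simp)
      intro h; rw [h] at this; exact absurd this (by decide)
    rw [htc, hds]
    have hneg : listNumRepresentationIsNegative
        (String.ofList [d] :: List.map (fun c => String.ofList [c]) ds) = false := by
      simp [listNumRepresentationIsNegative]
      intro h
      apply hd
      have := congrArg String.toList h
      simpa using this
    simp only [List.map_cons]
    rw [if_neg (by simp [hneg])]
    simp only [List.map_cons, List.map_map, Function.comp_def, String.toList_ofList]
    rw [List.flatten_cons, ← pv_join_nil_flatten, PySem.Chars.join_nil_singletons]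
    simp

theorem pv_bodyA (x : Int) (m : Int) (_hm : 0 ≤ m) :
    convertListToInt ((PySem.List.pyRange 0 m 1).foldl (fun c _ => c ++ ["0"])
      (let c0 := (PySem.Int.toStr x).toList.map (fun c => String.ofList [c])
       if listNumRepresentationIsNegative c0 then joinIdx1and2 c0 else c0))
    = pvP x (List.replicate m.toNat '0') := by
  rw [PySem.List.foldl_append_singleton_eq_map (f := fun _ => "0")]
  have hmap : List.map (fun _ : Int => ("0":String)) (PySem.List.pyRange 0 m) = List.replicate m.toNat "0" := by
    rw [List.map_const']
    congr 1
    simp [PySem.List.length_pyRange_one 0 m]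
  rw [hmap]
  rw [convertListToInt, PySem.Int.ofStr?.eq_1, PySem.Str.toList_join]
  rw [show ("":String).toList = [] from rfl, pv_join_nil_flatten]
  simp only [List.map_append, List.flatten_append, List.map_replicate]
  rw [show ("0" : String).toList = ['0'] from rfl, pv_flatten_rep, pv_cl_toChars]
  simp [pvP]

-- ===== VERDICT (by name: the statement is the Claim_ definition above) =====
theorem appendZeros_spec : Claim_equal_appendZeros := by
  unfold Claim_equal_appendZeros
  intro list _
  unfold Spec_appendZeros
  have hB : appendZeros_alt list = (pvF list.reverse []).reverse := by
    unfold appendZeros_alt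
    simp only [pv_foldB, List.nil_append]
    rfl
  have hA : appendZeros list = (PySem.List.enumerate list).map
      (fun p => pvP p.2 (List.replicate ((PySem.List.len list - 1 - p.1).toNat) '0')) := by
    unfold appendZeros
    apply List.map_congr_left
    intro p hp
    obtain ⟨k, hk, rfl⟩ := (PySem.List.mem_enumerate_iff _ _ _).mp hp
    have h0 : (0:Int) ≤ PySem.List.len list - 1 - (0 + (k:Int)) := by
      simp [PySem.List.len_eq]; omega
    exact pv_bodyA _ _ h0
  rw [hA, hB]
  apply List.ext_getElem?
  intro i
  by_cases hi : i < list.length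
  · rw [List.getElem?_map, PySem.List.getElem?_enumerate]
    rw [List.getElem?_reverse (by rw [pv_length_pvF]; simpa using hi)]
    rw [pv_length_pvF, List.length_reverse, pv_getElem?_pvF]
    rw [List.getElem?_reverse (by simpa using by omega : list.length - 1 - i < list.length)]
    rw [show list.length - 1 - (list.length - 1 - i) = i from by omega]
    rw [List.getElem?_eq_getElem hi]
    simp only [Option.map_some, List.nil_append]
    have hidx : ((PySem.List.len list - 1 - (0 + (i:Int))).toNat) = list.length - 1 - i := by
      simp only [PySem.List.len_eq]; omega
    rw [hidx]
  · rw [List.getElem?_eq_none (by simp [PySem.List.length_enumerate]; omega)]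
    rw [List.getElem?_eq_none (by simp [pv_length_pvF]; omega)]
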